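-- pv_equiv track=rewrite | github.com/mcappucci1/LeetCode | python/2510_check_if_there_is_a_path_with_equal_number_of_0's_and_1's.py | isThereAPath
-- ===== SOURCE A (Python) =====
-- from typing import List
--
-- def isThereAPath(grid: List[List[int]]) -> bool:
--
--     m = len(grid)
--     n = len(grid[0])
--
--     if (m + n) % 2 != 1:
--         return False
--
--     stack = [(0, 0, grid[0][0] * 2 - 1)]
--     seen = set()
--
--     while stack:
--         x, y, count = stack.pop()
--         if x == m-1 and y == n-1 and count == 0:
--             return True
--         if x < m-1:
--             tmp = count + grid[x+1][y] * 2 - 1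
--             if (x+1, y, tmp) not in seen:
--                 stack.append((x+1, y, tmp))
--                 seen.add((x+1, y, tmp))
--         if y < n-1:
--             tmp = count + grid[x][y+1] * 2 - 1
--             if (x, y+1, tmp) not in seen:
--                 stack.append((x, y+1, tmp))
--                 seen.add((x, y+1, tmp))
--
--     return False
-- ===== SOURCE B (Python) =====
-- from typing import List
--
-- def isThereAPath(grid: List[List[int]]) -> bool:
--     m = len(grid)
--     n = len(grid[0])
--
--     if (m + n) % 2 != 1:
--         return False
--
--     # dp over cells in row-major order: the set of running balances reachable at each cell
--     prev = []
--     for x in range(m):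
--         cur = []
--         for y in range(n):
--             d = grid[x][y] * 2 - 1
--             if x == 0 and y == 0:
--                 s = {d}
--             else:
--                 s = set()
--                 if x > 0:
--                     s |= {c + d for c in prev[y]}
--                 if y > 0:
--                     s |= {c + d for c in cur[y - 1]}
--             cur.append(s)
--         prev = cur
--     return 0 in prev[n - 1]
-- ===== Notes on version B (the rewrite author's own statement) =====
-- stated objective: alternative
-- what changed: Replaces A's DFS over (cell, running-balance) states with an explicit stack and a global seen set by a row-major dynamic-programming fill that keeps, per cell, the set of reachable running balances (carrying only the previous row), answering by membership of 0 in the last cell's set.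
import Mathlib
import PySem

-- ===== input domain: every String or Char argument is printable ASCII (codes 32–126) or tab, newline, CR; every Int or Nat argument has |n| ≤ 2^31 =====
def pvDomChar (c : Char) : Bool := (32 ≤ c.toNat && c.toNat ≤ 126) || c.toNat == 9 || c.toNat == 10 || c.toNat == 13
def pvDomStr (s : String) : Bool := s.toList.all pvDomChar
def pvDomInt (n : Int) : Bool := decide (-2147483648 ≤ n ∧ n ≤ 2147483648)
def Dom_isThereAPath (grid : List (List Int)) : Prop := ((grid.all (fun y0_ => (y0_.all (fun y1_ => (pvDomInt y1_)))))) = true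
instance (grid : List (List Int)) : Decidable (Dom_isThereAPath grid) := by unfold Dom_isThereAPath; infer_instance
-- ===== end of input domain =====

-- B replaces A's seen-set DFS over (cell, balance) states by a row-major DP that fills,
-- row by row, the set of reachable running balances per cell (objective: alternative).

-- ===== PORT A =====

-- grid[x][y]; under Pre_ every access either port performs is in range, so the default is never read
def pvCell (grid : List (List Int)) (x y : Nat) : Int := (grid.getD x []).getD y 0

-- fuel for A's while-loop: strictly more than twice the number of possible (x, y, count)
-- states (counts are bounded by (m+n)*(2*M+1) with M the largest |entry|); since the loop
-- pushes each state at most once, this fuel is never exhausted (proved below)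
def pvAFuel (grid : List (List Int)) : Nat :=
  let m := grid.length
  let n := (grid.headD []).length
  let M := grid.foldl (fun a row => row.foldl (fun a v => max a v.natAbs) a) 0
  2 + 2 * (m * n * (2 * ((m + n) * (2 * M + 1)) + 1))

-- the while-loop of A: stack with its top at the head (Python appends the down- then the
-- right-state and pops from the end, so the right-state ends up at the head)
def pvALoop (grid : List (List Int)) (m n : Nat) :
    Nat → List (Nat × Nat × Int) → PySem.Set (Nat × Nat × Int) → Bool
  | 0, _, _ => false
  | _ + 1, [], _ => false
  | fuel + 1, (x, y, c) :: rest, seen =>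
    if x = m - 1 ∧ y = n - 1 ∧ c = 0 then true
    else
      let p1 :=
        if x < m - 1 then
          let tmp := c + pvCell grid (x + 1) y * 2 - 1
          if ¬ PySem.Set.contains seen (x + 1, y, tmp) then
            ((x + 1, y, tmp) :: rest, PySem.Set.add seen (x + 1, y, tmp))
          else (rest, seen)
        else (rest, seen)
      let p2 :=
        if y < n - 1 then
          let tmp := c + pvCell grid x (y + 1) * 2 - 1
          if ¬ PySem.Set.contains p1.2 (x, y + 1, tmp) then
            ((x, y + 1, tmp) :: p1.1, PySem.Set.add p1.2 (x, y + 1, tmp))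
          else p1
        else p1
      pvALoop grid m n fuel p2.1 p2.2

def isThereAPath (grid : List (List Int)) : Bool :=
  let m := grid.length
  let n := (grid.headD []).length
  if (m + n) % 2 ≠ 1 then false
  else
    pvALoop grid m n (pvAFuel grid) [(0, 0, pvCell grid 0 0 * 2 - 1)] PySem.Set.empty

-- ===== PORT B =====

-- one cell of B's DP: the set of running balances reachable at (x, y)
def pvBCell (grid : List (List Int)) (x y : Nat)
    (prev cur : List (PySem.Set Int)) : PySem.Set Int :=
  let d := pvCell grid x y * 2 - 1
  if x = 0 ∧ y = 0 then PySem.Set.ofList [d]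
  else
    let s : PySem.Set Int := PySem.Set.empty
    let s := if 0 < x then PySem.Set.union s ((prev.getD y []).map (fun c => c + d)) else s
    if 0 < y then PySem.Set.union s ((cur.getD (y - 1) []).map (fun c => c + d)) else s

-- one row of B's DP, built left to right from the previous row
def pvBRow (grid : List (List Int)) (x n : Nat) (prev : List (PySem.Set Int)) :
    List (PySem.Set Int) :=
  (List.range n).foldl (fun cur y => cur ++ [pvBCell grid x y prev cur]) []

def isThereAPath_alt (grid : List (List Int)) : Bool :=
  let m := grid.length
  let n := (grid.headD []).length
  if (m + n) % 2 ≠ 1 then false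
  else
    let last := (List.range m).foldl (fun prev x => pvBRow grid x n prev) []
    PySem.Set.contains (last.getD (n - 1) PySem.Set.empty) 0

-- ===== PRECONDITION & SPEC =====

-- Pre_ excludes empty grids and, when the parity guard does not return False first, grids
-- whose first row is empty or longer than a later row: on those A raises IndexError.
def Pre_isThereAPath (grid : List (List Int)) : Prop :=
  grid ≠ [] ∧
    ((grid.length + (grid.headD []).length) % 2 ≠ 1 ∨
      ((grid.headD []) ≠ [] ∧ ∀ row ∈ grid, (grid.headD []).length ≤ row.length))

instance (grid : List (List Int)) : Decidable (Pre_isThereAPath grid) := by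
  unfold Pre_isThereAPath; infer_instance

def pvWitness_isThereAPath : List (List Int) := [[0, 1, 0], [1, 0, 1]]

def Spec_isThereAPath (grid : List (List Int)) (out : Bool) : Prop := out = isThereAPath_alt grid
instance (grid : List (List Int)) (out : Bool) : Decidable (Spec_isThereAPath grid out) := by unfold Spec_isThereAPath; infer_instance

-- ===== CLAIM (what is proved, stated in full; the proofs are below) =====
def Claim_equal_isThereAPath : Prop := ∀ (grid : List (List Int)), Dom_isThereAPath grid → Pre_isThereAPath grid → Spec_isThereAPath grid (isThereAPath grid)

-- ===== LEMMAS AND PROOFS =====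

-- the (x, y, balance) states reachable by down/right moves from the start cell
inductive pvReach (grid : List (List Int)) (m n : Nat) : Nat → Nat → Int → Prop
  | start : pvReach grid m n 0 0 (pvCell grid 0 0 * 2 - 1)
  | down {x y c} : pvReach grid m n x y c → x + 1 < m →
      pvReach grid m n (x + 1) y (c + pvCell grid (x + 1) y * 2 - 1)
  | right {x y c} : pvReach grid m n x y c → y + 1 < n →
      pvReach grid m n x (y + 1) (c + pvCell grid x (y + 1) * 2 - 1)

-- successors of a state, as A's loop generates them
def pvSuccs (grid : List (List Int)) (m n : Nat) (s : Nat × Nat × Int) :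
    List (Nat × Nat × Int) :=
  (if s.1 < m - 1 then [(s.1 + 1, s.2.1, s.2.2 + pvCell grid (s.1 + 1) s.2.1 * 2 - 1)] else []) ++
  (if s.2.1 < n - 1 then [(s.1, s.2.1 + 1, s.2.2 + pvCell grid s.1 (s.2.1 + 1) * 2 - 1)] else [])

-- states reachable from the stack along successors avoiding the seen set
inductive pvLR (grid : List (List Int)) (m n : Nat)
    (stack seen : List (Nat × Nat × Int)) : (Nat × Nat × Int) → Prop
  | base {s} : s ∈ stack → pvLR grid m n stack seen s
  | step {v u} : pvLR grid m n stack seen v → u ∈ pvSuccs grid m n v → u ∉ seen →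
      pvLR grid m n stack seen u

-- the maximal |entry| of the grid (the M of pvAFuel)
def pvM (grid : List (List Int)) : Nat :=
  grid.foldl (fun a row => row.foldl (fun a v => max a v.natAbs) a) 0

-- states A's loop can ever hold, with a balance bound graded by the path length
def pvInU (grid : List (List Int)) (m n : Nat) (s : Nat × Nat × Int) : Prop :=
  s.1 < m ∧ s.2.1 < n ∧ s.2.2.natAbs ≤ (s.1 + s.2.1 + 1) * (2 * pvM grid + 1)

-- a finite superset of those states
def pvUfin (grid : List (List Int)) (m n : Nat) : Finset (Nat × Nat × Int) :=
  Finset.range m ×ˢ Finset.range n ×ˢ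
    (Finset.range (2 * ((m + n) * (2 * pvM grid + 1)) + 1)).image
      (fun (k : Nat) => ((k : Int) - ((m + n) * (2 * pvM grid + 1) : Nat)))

-- the loop measure: stack size plus twice the unseen part of the universe
def pvMu (grid : List (List Int)) (m n : Nat)
    (stack seen : List (Nat × Nat × Int)) : Nat :=
  stack.length + 2 * ((pvUfin grid m n) \ seen.toFinset).card

theorem pvLR_nil {grid : List (List Int)} {m n : Nat} {seen : List (Nat × Nat × Int)}
    {t : Nat × Nat × Int} : ¬ pvLR grid m n [] seen t := by
  intro h
  induction h with
  | base h => simp at h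
  | step _ _ _ ih => exact ih

-- popping s and pushing its unseen successors preserves reachability of t ≠ s
theorem pvLR_pop {grid : List (List Int)} {m n : Nat}
    {s t : Nat × Nat × Int} {rest seen stack' seen' : List (Nat × Nat × Int)}
    (hstack' : ∀ u, u ∈ stack' ↔ (u ∈ pvSuccs grid m n s ∧ u ∉ seen) ∨ u ∈ rest)
    (hseen' : ∀ u, u ∈ seen' ↔ u ∈ seen ∨ (u ∈ pvSuccs grid m n s ∧ u ∉ seen))
    (hne : t ≠ s) :
    pvLR grid m n stack' seen' t ↔ pvLR grid m n (s :: rest) seen t := by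
  constructor
  · intro h
    clear hne
    induction h with
    | base hmem =>
      rcases (hstack' _).mp hmem with ⟨h1, h2⟩ | hr
      · exact pvLR.step (pvLR.base (List.mem_cons_self)) h1 h2
      · exact pvLR.base (List.mem_cons_of_mem _ hr)
    | step _ hsucc hns ih =>
      exact pvLR.step ih hsucc (fun hc => hns ((hseen' _).mpr (Or.inl hc)))
  · intro h
    have key : ∀ u, pvLR grid m n (s :: rest) seen u →
        u = s ∨ pvLR grid m n stack' seen' u := by
      intro u hu
      induction hu with
      | base hmem =>
        rcases List.mem_cons.mp hmem with h2 | h2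
        · exact Or.inl h2
        · exact Or.inr (pvLR.base ((hstack' _).mpr (Or.inr h2)))
      | @step v2 u2 _ hsucc hns ih =>
        rcases ih with rfl | hnew
        · exact Or.inr (pvLR.base ((hstack' _).mpr (Or.inl ⟨hsucc, hns⟩)))
        · by_cases hu2 : u2 ∈ seen'
          · rcases (hseen' _).mp hu2 with h2 | ⟨h1, h2⟩
            · exact absurd h2 hns
            · exact Or.inr (pvLR.base ((hstack' _).mpr (Or.inl ⟨h1, h2⟩)))
          · exact Or.inr (pvLR.step hnew hsucc hu2)
    rcases key _ h with rfl | h2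
    · exact absurd rfl hne
    · exact h2

-- adequacy of pvLR at the initial state
theorem pvLR_start_iff {grid : List (List Int)} {m n : Nat} (t : Nat × Nat × Int) :
    pvLR grid m n [(0, 0, pvCell grid 0 0 * 2 - 1)] [] t ↔ pvReach grid m n t.1 t.2.1 t.2.2 := by
  constructor
  · intro h
    induction h with
    | base hmem =>
      have heq := List.eq_of_mem_singleton hmem
      subst heq
      exact pvReach.start
    | step _ hsucc _ ih =>
      rcases List.mem_append.mp hsucc with h2 | h2 <;> split_ifs at h2 with hc
      · have h3 := List.eq_of_mem_singleton h2
        subst h3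
        exact pvReach.down ih (by omega)
      · exact absurd h2 (List.not_mem_nil)
      · have h3 := List.eq_of_mem_singleton h2
        subst h3
        exact pvReach.right ih (by omega)
      · exact absurd h2 (List.not_mem_nil)
  · obtain ⟨x, y, c⟩ := t
    intro h0
    have h : pvReach grid m n x y c := h0
    clear h0
    induction h with
    | start => exact pvLR.base (List.mem_singleton.mpr rfl)
    | @down x2 y2 c2 _ hlt ih =>
      refine pvLR.step ih ?_ (List.not_mem_nil)
      unfold pvSuccs
      exact List.mem_append.mpr (Or.inl (by rw [if_pos (show x2 < m - 1 by omega)]; simp))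
    | @right x2 y2 c2 _ hlt ih =>
      refine pvLR.step ih ?_ (List.not_mem_nil)
      unfold pvSuccs
      exact List.mem_append.mpr (Or.inr (by rw [if_pos (show y2 < n - 1 by omega)]; simp))

theorem pv_seed_le_inner (row : List Int) (a : Nat) :
    a ≤ row.foldl (fun a v => max a v.natAbs) a := by
  induction row generalizing a with
  | nil => exact le_refl _
  | cons r rs ih => exact le_trans (le_max_left _ _) (ih _)

theorem pv_mem_inner {row : List Int} {v : Int} (hv : v ∈ row) (a : Nat) :
    v.natAbs ≤ row.foldl (fun a v => max a v.natAbs) a := by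
  induction row generalizing a with
  | nil => exact absurd hv (List.not_mem_nil)
  | cons r rs ih =>
    rcases List.mem_cons.mp hv with rfl | h2
    · exact le_trans (le_max_right _ _) (pv_seed_le_inner _ _)
    · exact ih h2 _

theorem pv_seed_le_outer (gs : List (List Int)) (a : Nat) :
    a ≤ gs.foldl (fun a row => row.foldl (fun a v => max a v.natAbs) a) a := by
  induction gs generalizing a with
  | nil => exact le_refl _
  | cons r rs ih => exact le_trans (pv_seed_le_inner _ _) (ih _)

theorem pv_mem_outer {gs : List (List Int)} {row : List Int} {v : Int}
    (hrow : row ∈ gs) (hv : v ∈ row) (a : Nat) :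
    v.natAbs ≤ gs.foldl (fun a row => row.foldl (fun a v => max a v.natAbs) a) a := by
  induction gs generalizing a with
  | nil => exact absurd hrow (List.not_mem_nil)
  | cons r rs ih =>
    rcases List.mem_cons.mp hrow with rfl | h2
    · exact le_trans (pv_mem_inner hv _) (pv_seed_le_outer _ _)
    · exact ih h2 _

theorem pvCell_abs_le (grid : List (List Int)) (x y : Nat) :
    (pvCell grid x y).natAbs ≤ pvM grid := by
  unfold pvCell pvM
  by_cases hx : x < grid.length
  · rw [List.getD_eq_getElem _ _ hx]
    by_cases hy : y < grid[x].length
    · rw [List.getD_eq_getElem _ _ hy]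
      exact pv_mem_outer (List.getElem_mem hx) (List.getElem_mem hy) 0
    · rw [List.getD_eq_default _ _ (Nat.le_of_not_lt hy)]
      exact Nat.zero_le _
  · rw [List.getD_eq_default _ _ (Nat.le_of_not_lt hx), List.getD_nil]
    exact Nat.zero_le _

theorem pvSuccs_inU {grid : List (List Int)} {m n : Nat} {s u : Nat × Nat × Int}
    (hs : pvInU grid m n s) (hu : u ∈ pvSuccs grid m n s) : pvInU grid m n u := by
  obtain ⟨x, y, c⟩ := s
  obtain ⟨hx, hy, hc⟩ := hs
  simp only at hx hy hc
  have hK : ∀ x2 y2, ((pvCell grid x2 y2 * 2 - 1).natAbs) ≤ 2 * pvM grid + 1 := by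
    intro x2 y2
    have := pvCell_abs_le grid x2 y2
    omega
  dsimp only [pvSuccs] at hu
  rcases List.mem_append.mp hu with h2 | h2 <;> split_ifs at h2 with hcnd <;>
      try exact absurd h2 (List.not_mem_nil)
  all_goals have h3 := List.eq_of_mem_singleton h2
  all_goals subst h3
  · refine ⟨show x + 1 < m by omega, show y < n by omega,
      show (c + pvCell grid (x + 1) y * 2 - 1).natAbs
        ≤ ((x + 1) + y + 1) * (2 * pvM grid + 1) from ?_⟩
    have h1 := hK (x + 1) y
    have hmul : ((x + 1) + y + 1) * (2 * pvM grid + 1)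
        = (x + y + 1) * (2 * pvM grid + 1) + (2 * pvM grid + 1) := by ring
    have htri : (c + (pvCell grid (x + 1) y * 2 - 1)).natAbs
        ≤ c.natAbs + (pvCell grid (x + 1) y * 2 - 1).natAbs := Int.natAbs_add_le _ _
    have harr : c + pvCell grid (x + 1) y * 2 - 1 = c + (pvCell grid (x + 1) y * 2 - 1) := by ring
    rw [hmul, harr]
    omega
  · refine ⟨show x < m by omega, show y + 1 < n by omega,
      show (c + pvCell grid x (y + 1) * 2 - 1).natAbs
        ≤ (x + (y + 1) + 1) * (2 * pvM grid + 1) from ?_⟩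
    have h1 := hK x (y + 1)
    have hmul : (x + (y + 1) + 1) * (2 * pvM grid + 1)
        = (x + y + 1) * (2 * pvM grid + 1) + (2 * pvM grid + 1) := by ring
    have htri : (c + (pvCell grid x (y + 1) * 2 - 1)).natAbs
        ≤ c.natAbs + (pvCell grid x (y + 1) * 2 - 1).natAbs := Int.natAbs_add_le _ _
    have harr : c + pvCell grid x (y + 1) * 2 - 1 = c + (pvCell grid x (y + 1) * 2 - 1) := by ring
    rw [hmul, harr]
    omega

theorem pvInU_mem_Ufin {grid : List (List Int)} {m n : Nat} {s : Nat × Nat × Int}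
    (hs : pvInU grid m n s) : s ∈ pvUfin grid m n := by
  obtain ⟨x, y, c⟩ := s
  obtain ⟨hx, hy, hc⟩ := hs
  simp only at hx hy hc
  have hle : (x + y + 1) * (2 * pvM grid + 1) ≤ (m + n) * (2 * pvM grid + 1) :=
    Nat.mul_le_mul_right _ (by omega)
  simp only [pvUfin, Finset.mem_product, Finset.mem_range, Finset.mem_image]
  refine ⟨hx, hy, (c + ((m + n) * (2 * pvM grid + 1) : Nat)).toNat, by omega, by omega⟩

theorem pvUfin_card (grid : List (List Int)) (m n : Nat) :
    (pvUfin grid m n).card = m * n * (2 * ((m + n) * (2 * pvM grid + 1)) + 1) := by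
  unfold pvUfin
  rw [Finset.card_product, Finset.card_product,
    Finset.card_image_of_injective _ (fun a b h => by omega),
    Finset.card_range, Finset.card_range, Finset.card_range]
  ring

theorem pvSuccs_nodup (grid : List (List Int)) (m n : Nat) (s : Nat × Nat × Int) :
    (pvSuccs grid m n s).Nodup := by
  obtain ⟨x, y, c⟩ := s
  dsimp only [pvSuccs]
  split_ifs <;> simp

-- one non-final iteration of A's loop, written with the unseen successors filtered out
theorem pvALoop_step_eq (grid : List (List Int)) (m n fuel : Nat) (x y : Nat) (c : Int)
    (rest seen : List (Nat × Nat × Int)) (hs : ¬(x = m - 1 ∧ y = n - 1 ∧ c = 0)) :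
    pvALoop grid m n (fuel + 1) ((x, y, c) :: rest) seen =
    pvALoop grid m n fuel
      (((pvSuccs grid m n (x, y, c)).filter (fun u => !PySem.Set.contains seen u)).reverse ++ rest)
      (seen ++ (pvSuccs grid m n (x, y, c)).filter (fun u => !PySem.Set.contains seen u)) := by
  have hdr : ((x + 1, y, c + pvCell grid (x + 1) y * 2 - 1) : Nat × Nat × Int)
      ≠ (x, y + 1, c + pvCell grid x (y + 1) * 2 - 1) := by simp
  simp only [pvALoop, if_neg hs]
  dsimp only [pvSuccs]
  by_cases hd : x < m - 1 <;> by_cases hr : y < n - 1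
  · simp only [if_pos hd, if_pos hr]
    by_cases hcd : (x + 1, y, c + pvCell grid (x + 1) y * 2 - 1) ∈ seen
    · by_cases hcr : (x, y + 1, c + pvCell grid x (y + 1) * 2 - 1) ∈ seen
      · simp [hcd, hcr]
      · simp [hcd, hcr]
    · have h1 : PySem.Set.add seen (x + 1, y, c + pvCell grid (x + 1) y * 2 - 1)
          = seen ++ [(x + 1, y, c + pvCell grid (x + 1) y * 2 - 1)] := PySem.Set.add_of_not_mem hcd
      by_cases hcr : (x, y + 1, c + pvCell grid x (y + 1) * 2 - 1) ∈ seen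
      · simp [hcd, hcr, Ne.symm hdr]
      · have h2 : PySem.Set.add (seen ++ [(x + 1, y, c + pvCell grid (x + 1) y * 2 - 1)])
            (x, y + 1, c + pvCell grid x (y + 1) * 2 - 1)
            = seen ++ [(x + 1, y, c + pvCell grid (x + 1) y * 2 - 1)]
              ++ [(x, y + 1, c + pvCell grid x (y + 1) * 2 - 1)] :=
          PySem.Set.add_of_not_mem (by simp [hcr, Ne.symm hdr])
        simp [hcd, hcr, Ne.symm hdr]
  · simp only [if_pos hd, if_neg hr]
    by_cases hcd : (x + 1, y, c + pvCell grid (x + 1) y * 2 - 1) ∈ seen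
    · simp [hcd]
    · simp [hcd]
  · simp only [if_neg hd, if_pos hr]
    by_cases hcr : (x, y + 1, c + pvCell grid x (y + 1) * 2 - 1) ∈ seen
    · simp [hcr]
    · simp [hcr]
  · simp [if_neg hd, if_neg hr]

-- the main loop characterisation
theorem pvALoop_iff {grid : List (List Int)} {m n : Nat} :
    ∀ (fuel : Nat) (stack seen : List (Nat × Nat × Int)),
    (∀ s ∈ stack, pvInU grid m n s) →
    pvMu grid m n stack seen < fuel →
    (pvALoop grid m n fuel stack seen = true ↔ pvLR grid m n stack seen (m - 1, n - 1, 0)) := by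
  intro fuel
  induction fuel with
  | zero => intro stack seen _ hmu; exact absurd hmu (Nat.not_lt_zero _)
  | succ fuel ih =>
    intro stack seen hU hmu
    match stack with
    | [] =>
      refine iff_of_false ?_ pvLR_nil
      simp [pvALoop]
    | (x, y, c) :: rest =>
      by_cases hsucc : x = m - 1 ∧ y = n - 1 ∧ c = 0
      · refine iff_of_true (by simp [pvALoop, hsucc]) ?_
        obtain ⟨h1, h2, h3⟩ := hsucc
        subst h1; subst h2; subst h3
        exact pvLR.base List.mem_cons_self
      · rw [pvALoop_step_eq grid m n fuel x y c rest seen hsucc]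
        have hps := (pvSuccs_nodup grid m n (x, y, c)).filter (fun u => !PySem.Set.contains seen u)
        set ps := (pvSuccs grid m n (x, y, c)).filter (fun u => !PySem.Set.contains seen u) with hpsdef
        have hpsmem : ∀ u ∈ ps, u ∈ pvSuccs grid m n (x, y, c) ∧ u ∉ seen := by
          intro u hu
          have := List.of_mem_filter hu
          exact ⟨List.mem_of_mem_filter hu, by simpa using this⟩
        have hheadU : pvInU grid m n (x, y, c) := hU _ List.mem_cons_self
        have hpsU : ∀ u ∈ ps, pvInU grid m n u :=
          fun u hu => pvSuccs_inU hheadU (hpsmem u hu).1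
        -- the measure strictly decreases
        have hsub : ps.toFinset ⊆ pvUfin grid m n \ seen.toFinset := by
          intro u hu
          rw [List.mem_toFinset] at hu
          rw [Finset.mem_sdiff, List.mem_toFinset]
          exact ⟨pvInU_mem_Ufin (hpsU u hu), (hpsmem u hu).2⟩
        have hsplit : pvUfin grid m n \ (seen ++ ps).toFinset
            = (pvUfin grid m n \ seen.toFinset) \ ps.toFinset := by
          rw [List.toFinset_append]
          ext u; simp; tauto
        have hcard : (pvUfin grid m n \ (seen ++ ps).toFinset).card
            = (pvUfin grid m n \ seen.toFinset).card - ps.length := by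
          rw [hsplit, Finset.card_sdiff, Finset.inter_eq_left.mpr hsub, List.toFinset_card_of_nodup hps]
        have hlen : ps.length ≤ (pvUfin grid m n \ seen.toFinset).card := by
          calc ps.length = ps.toFinset.card := (List.toFinset_card_of_nodup hps).symm
            _ ≤ _ := Finset.card_le_card hsub
        have hmu2 : pvMu grid m n (ps.reverse ++ rest) (seen ++ ps) < fuel := by
          unfold pvMu at hmu ⊢
          rw [hcard]
          simp only [List.length_append, List.length_reverse, List.length_cons] at hmu ⊢
          omega
        rw [ih (ps.reverse ++ rest) (seen ++ ps)
          (by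
            intro u hu
            rcases List.mem_append.mp hu with hu | hu
            · exact hpsU u (List.mem_reverse.mp hu)
            · exact hU u (List.mem_cons_of_mem _ hu))
          hmu2]
        refine pvLR_pop (fun u => ?_) (fun u => ?_) (fun he => hsucc ?_)
        · constructor
          · intro hu
            rcases List.mem_append.mp hu with hu | hu
            · exact Or.inl (hpsmem u (List.mem_reverse.mp hu))
            · exact Or.inr hu
          · intro hu
            rcases hu with ⟨h1, h2⟩ | hu
            · exact List.mem_append.mpr (Or.inl (List.mem_reverse.mpr
                (List.mem_filter.mpr ⟨h1, by simpa using h2⟩)))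
            · exact List.mem_append.mpr (Or.inr hu)
        · constructor
          · intro hu
            rcases List.mem_append.mp hu with hu | hu
            · exact Or.inl hu
            · exact Or.inr (hpsmem u hu)
          · intro hu
            rcases hu with hu | ⟨h1, h2⟩
            · exact List.mem_append.mpr (Or.inl hu)
            · exact List.mem_append.mpr (Or.inr (List.mem_filter.mpr ⟨h1, by simpa using h2⟩))
        · exact ⟨(congrArg Prod.fst he).symm, (congrArg (fun p => p.2.1) he).symm,
            (congrArg (fun p => p.2.2) he).symm⟩

theorem pvA_char {grid : List (List Int)} (hm : grid ≠ []) (hn : grid.headD [] ≠ [])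
    (hg : (grid.length + (grid.headD []).length) % 2 = 1) :
    (isThereAPath grid = true ↔
      pvReach grid grid.length (grid.headD []).length
        (grid.length - 1) ((grid.headD []).length - 1) 0) := by
  have hm0 : 0 < grid.length := List.length_pos_of_ne_nil hm
  have hn0 : 0 < (grid.headD []).length := List.length_pos_of_ne_nil hn
  have hinv : ∀ s ∈ [((0 : Nat), (0 : Nat), pvCell grid 0 0 * 2 - 1)],
      pvInU grid grid.length (grid.headD []).length s := by
    intro s hs
    have heq := List.eq_of_mem_singleton hs
    subst heq
    refine ⟨hm0, hn0, ?_⟩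
    show (pvCell grid 0 0 * 2 - 1).natAbs ≤ (0 + 0 + 1) * (2 * pvM grid + 1)
    have := pvCell_abs_le grid 0 0
    have h1 : (0 + 0 + 1) * (2 * pvM grid + 1) = 2 * pvM grid + 1 := by ring
    rw [h1]
    omega
  have hmu : pvMu grid grid.length (grid.headD []).length
      [((0 : Nat), (0 : Nat), pvCell grid 0 0 * 2 - 1)] PySem.Set.empty < pvAFuel grid := by
    unfold pvMu pvAFuel
    have hcap := pvUfin_card grid grid.length (grid.headD []).length
    have hempty : (PySem.Set.empty : List (Nat × Nat × Int)).toFinset = ∅ := rfl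
    rw [hempty, Finset.sdiff_empty, hcap]
    simp only [List.length_singleton, pvM]
    omega
  have hloop := pvALoop_iff (pvAFuel grid)
    [((0 : Nat), (0 : Nat), pvCell grid 0 0 * 2 - 1)] PySem.Set.empty hinv hmu
  have hstart := pvLR_start_iff (grid := grid) (m := grid.length) (n := (grid.headD []).length)
    ((grid.length - 1, (grid.headD []).length - 1, 0) : Nat × Nat × Int)
  unfold isThereAPath
  rw [if_neg (by omega)]
  exact hloop.trans hstart

-- B-side: each DP cell holds exactly the reachable balances
theorem pvReach_zero_zero {grid : List (List Int)} {m n : Nat} {c : Int} :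
    pvReach grid m n 0 0 c ↔ c = pvCell grid 0 0 * 2 - 1 := by
  constructor
  · intro h
    cases h
    rfl
  · intro h
    subst h
    exact pvReach.start

theorem pvBCell_mem {grid : List (List Int)} {m n x y : Nat}
    {prev cur : List (PySem.Set Int)}
    (hx : x < m) (hy : y < n)
    (hprev : 0 < x → ∀ y2 < n, ∀ c, (c ∈ prev.getD y2 [] ↔ pvReach grid m n (x - 1) y2 c))
    (hcur : ∀ y2 < y, ∀ c, (c ∈ cur.getD y2 [] ↔ pvReach grid m n x y2 c)) :
    ∀ c, c ∈ pvBCell grid x y prev cur ↔ pvReach grid m n x y c := by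
  intro c
  unfold pvBCell
  by_cases h00 : x = 0 ∧ y = 0
  · rw [if_pos h00]
    obtain ⟨rfl, rfl⟩ := h00
    rw [PySem.Set.mem_ofList, List.mem_singleton, pvReach_zero_zero]
  · rw [if_neg h00]
    have hmem : (c ∈ (if 0 < y then
          PySem.Set.union
            (if 0 < x then PySem.Set.union PySem.Set.empty
                ((prev.getD y []).map (fun c => c + (pvCell grid x y * 2 - 1)))
              else PySem.Set.empty)
            ((cur.getD (y - 1) []).map (fun c => c + (pvCell grid x y * 2 - 1)))
        else
          (if 0 < x then PySem.Set.union PySem.Set.empty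
              ((prev.getD y []).map (fun c => c + (pvCell grid x y * 2 - 1)))
            else PySem.Set.empty))) ↔
        ((0 < x ∧ c ∈ (prev.getD y []).map (fun c => c + (pvCell grid x y * 2 - 1))) ∨
         (0 < y ∧ c ∈ (cur.getD (y - 1) []).map (fun c => c + (pvCell grid x y * 2 - 1)))) := by
      by_cases hx0 : 0 < x <;> by_cases hy0 : 0 < y <;>
          simp [hx0, hy0, PySem.Set.mem_union, PySem.Set.empty]
    rw [hmem]
    constructor
    · rintro (⟨hx0, hmap⟩ | ⟨hy0, hmap⟩)
      · obtain ⟨a, ha, rfl⟩ := List.mem_map.mp hmap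
        have hr : pvReach grid m n (x - 1) y a := ((hprev hx0 y hy a).mp ha)
        have hd := pvReach.down hr (show x - 1 + 1 < m by omega)
        have hxx : x - 1 + 1 = x := by omega
        rw [hxx] at hd
        have harr : a + (pvCell grid x y * 2 - 1) = a + pvCell grid x y * 2 - 1 := by ring
        rw [harr]
        exact hd
      · obtain ⟨a, ha, rfl⟩ := List.mem_map.mp hmap
        have hr : pvReach grid m n x (y - 1) a := ((hcur (y - 1) (by omega) a).mp ha)
        have hd := pvReach.right hr (show y - 1 + 1 < n by omega)
        have hyy : y - 1 + 1 = y := by omega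
        rw [hyy] at hd
        have harr : a + (pvCell grid x y * 2 - 1) = a + pvCell grid x y * 2 - 1 := by ring
        rw [harr]
        exact hd
    · intro h
      cases h with
      | start => exact absurd ⟨rfl, rfl⟩ h00
      | @down x2 y2 c2 h2 hlt =>
        refine Or.inl ⟨by omega, List.mem_map.mpr ⟨c2, ?_, by ring⟩⟩
        have hxx : x2 + 1 - 1 = x2 := by omega
        exact (hprev (by omega) y hy c2).mpr (by rw [hxx]; exact h2)
      | @right x2 y2 c2 h2 hlt =>
        refine Or.inr ⟨by omega, List.mem_map.mpr ⟨c2, ?_, by ring⟩⟩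
        have hyy : y2 + 1 - 1 = y2 := by omega
        exact (hcur (y2 + 1 - 1) (by omega) c2).mpr (by rw [hyy]; exact h2)

theorem pvBRow_spec {grid : List (List Int)} {m n x : Nat} {prev : List (PySem.Set Int)}
    (hx : x < m)
    (hprev : 0 < x → ∀ y' < n, ∀ c, (c ∈ prev.getD y' [] ↔ pvReach grid m n (x - 1) y' c)) :
    (pvBRow grid x n prev).length = n ∧
    ∀ y' < n, ∀ c, (c ∈ (pvBRow grid x n prev).getD y' [] ↔ pvReach grid m n x y' c) := by
  have haux : ∀ k, k ≤ n →
      ((List.range k).foldl (fun cur y => cur ++ [pvBCell grid x y prev cur]) []).length = k ∧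
      ∀ y' < k, ∀ c,
        (c ∈ ((List.range k).foldl (fun cur y => cur ++ [pvBCell grid x y prev cur]) []).getD y' []
          ↔ pvReach grid m n x y' c) := by
    intro k
    induction k with
    | zero => exact fun _ => ⟨rfl, fun y2 hy2 => absurd hy2 (by omega)⟩
    | succ k ihk =>
      intro hk
      obtain ⟨hlen, hmem⟩ := ihk (by omega)
      set cur := (List.range k).foldl (fun cur y => cur ++ [pvBCell grid x y prev cur]) []
        with hcur
      have hfold : (List.range (k + 1)).foldl
          (fun cur y => cur ++ [pvBCell grid x y prev cur]) []
          = cur ++ [pvBCell grid x k prev cur] := by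
        rw [List.range_succ, List.foldl_append]
        rfl
      rw [hfold]
      refine ⟨by simp [hlen], ?_⟩
      intro y2 hy2 c
      by_cases hlt : y2 < k
      · rw [List.getD_append _ _ _ _ (by omega)]
        exact hmem y2 hlt c
      · have hy2k : y2 = k := by omega
        subst hy2k
        have hgd : (cur ++ [pvBCell grid x y2 prev cur]).getD y2 [] = pvBCell grid x y2 prev cur := by
          rw [List.getD_eq_getElem?_getD, ← hlen, List.getElem?_concat_length]
          rfl
        rw [hgd]
        exact pvBCell_mem hx (by omega) hprev (fun y3 hy3 c2 => hmem y3 (by omega) c2) c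
  exact haux n (le_refl n)

theorem pvB_char {grid : List (List Int)} (hm : grid ≠ []) (hn : grid.headD [] ≠ [])
    (hg : (grid.length + (grid.headD []).length) % 2 = 1) :
    (isThereAPath_alt grid = true ↔
      pvReach grid grid.length (grid.headD []).length
        (grid.length - 1) ((grid.headD []).length - 1) 0) := by
  have hm0 : 0 < grid.length := List.length_pos_of_ne_nil hm
  have hn0 : 0 < (grid.headD []).length := List.length_pos_of_ne_nil hn
  set m := grid.length with hmdef
  set n := (grid.headD []).length with hndef
  have haux : ∀ k, k ≤ m → 0 < k →
      ((List.range k).foldl (fun prev x => pvBRow grid x n prev) []).length = n ∧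
      ∀ y2 < n, ∀ c,
        (c ∈ ((List.range k).foldl (fun prev x => pvBRow grid x n prev) []).getD y2 []
          ↔ pvReach grid m n (k - 1) y2 c) := by
    intro k
    induction k with
    | zero => exact fun _ h => absurd h (by omega)
    | succ k ihk =>
      intro hk _
      have hfold : (List.range (k + 1)).foldl (fun prev x => pvBRow grid x n prev) []
          = pvBRow grid k n ((List.range k).foldl (fun prev x => pvBRow grid x n prev) []) := by
        rw [List.range_succ, List.foldl_append]
        rfl
      rw [hfold]
      have hspec := pvBRow_spec (m := m)
        (prev := (List.range k).foldl (fun prev x => pvBRow grid x n prev) [])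
        (show k < m by omega)
        (fun hk0 => by
          have := (ihk (by omega) hk0).2
          simpa using this)
      exact ⟨hspec.1, fun y2 hy2 c => by simpa using hspec.2 y2 hy2 c⟩
  obtain ⟨hlen, hmem⟩ := haux m (le_refl m) hm0
  unfold isThereAPath_alt
  rw [← hmdef, ← hndef, if_neg (by omega)]
  have hiff := hmem (n - 1) (by omega) 0
  constructor
  · intro h
    exact hiff.mp (by simpa [PySem.Set.empty] using h)
  · intro h
    simpa [PySem.Set.empty] using hiff.mpr h

-- ===== VERDICT (by name: the statement is the Claim_ definition above) =====
theorem isThereAPath_spec : Claim_equal_isThereAPath := by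
  intro grid _ hPre
  unfold Spec_isThereAPath
  obtain ⟨hm, hdisj⟩ := hPre
  by_cases hg : (grid.length + (grid.headD []).length) % 2 = 1
  · have hn : grid.headD [] ≠ [] := by
      rcases hdisj with h | h
      · exact absurd hg h
      · exact h.1
    have hA := pvA_char hm hn hg
    have hB := pvB_char hm hn hg
    cases hA' : isThereAPath grid
    · cases hB' : isThereAPath_alt grid
      · rfl
      · exact absurd (hA.mpr (hB.mp hB')) (by simp [hA'])
    · exact (hB.mpr (hA.mp hA')).symm
  · simp only [isThereAPath, isThereAPath_alt]
    rw [if_pos (by omega), if_pos (by omega)]
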